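-- pv_equiv track=rewrite | github.com/Noetheon/vuln-prioritizer-workbench | backend/src/vuln_prioritizer/inputs/parsers/common.py | split_versions
-- ===== SOURCE A (Python) =====
-- def split_versions(value: object) -> list[str]:
--     if value is None:
--         return []
--     if isinstance(value, list):
--         return as_string_list(value)
--     if not isinstance(value, str):
--         return []
--     separators = [",", "|"]
--     result = [value]
--     for separator in separators:
--         parts: list[str] = []
--         for item in result:
--             parts.extend(item.split(separator))
--         result = parts
--     return [item.strip() for item in result if item.strip()]
--
-- def as_string_list(value: object) -> list[str]:
--     if not isinstance(value, list):
--         return []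
--     return [str(item).strip() for item in value if item is not None and str(item).strip()]
-- ===== SOURCE B (Python) =====
-- import re
--
-- def split_versions(value: object) -> list[str]:
--     if value is None:
--         return []
--     if isinstance(value, list):
--         return as_string_list(value)
--     if not isinstance(value, str):
--         return []
--     parts = re.split(r"[,|]", value)
--     return [p.strip() for p in parts if p.strip()]
--
-- def as_string_list(value: object) -> list[str]:
--     if not isinstance(value, list):
--         return []
--     return [str(item).strip() for item in value if item is not None and str(item).strip()]
-- ===== Notes on version B (the rewrite author's own statement) =====
-- stated objective: simpler
-- what changed: The two sequential splitting loops (split every fragment on ',' then re-split every fragment on '|') are replaced by one regex split on the character class [,|], a single pass over the string.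
import Mathlib
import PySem

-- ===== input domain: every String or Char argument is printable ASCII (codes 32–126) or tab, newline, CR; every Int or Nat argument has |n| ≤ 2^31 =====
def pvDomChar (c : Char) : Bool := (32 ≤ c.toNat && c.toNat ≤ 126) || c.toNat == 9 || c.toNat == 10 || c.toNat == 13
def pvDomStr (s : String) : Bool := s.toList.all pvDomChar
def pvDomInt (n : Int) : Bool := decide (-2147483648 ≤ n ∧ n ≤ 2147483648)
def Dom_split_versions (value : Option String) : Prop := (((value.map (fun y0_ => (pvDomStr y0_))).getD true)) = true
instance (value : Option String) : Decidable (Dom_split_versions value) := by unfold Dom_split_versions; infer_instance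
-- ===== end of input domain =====

-- ===== PORT A =====
-- A: split on "," then split every fragment on "|" (two sequential loops), then strip/filter.
def split_versions (value : Option String) : List String :=
  match value with
  | none => []
  | some s =>
      -- 'value is None' / list / non-str guards: on Option String only the None guard is live
      let separators : List Char := [',', '|']
      let result := separators.foldl
        (fun result sep =>
          result.foldl (fun parts item => parts ++ PySem.Chars.splitOn item [sep]) [])
        [s.toList]
      (result.filter (fun item => !(PySem.Chars.strip item).isEmpty)).map
        (fun item => String.ofList (PySem.Chars.strip item))

-- ===== PORT B =====
-- single-pass split on the character class [,|] — exact port of re.split(r"[,|]", value)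
def reSplitSeps : List Char → List (List Char)
  | [] => [[]]
  | c :: cs =>
      if c = ',' ∨ c = '|' then [] :: reSplitSeps cs
      else
        match reSplitSeps cs with
        | [] => [[c]]
        | t :: ts => (c :: t) :: ts

def split_versions_alt (value : Option String) : List String :=
  match value with
  | none => []
  | some s =>
      let parts := reSplitSeps s.toList
      (parts.filter (fun p => !(PySem.Chars.strip p).isEmpty)).map
        (fun p => String.ofList (PySem.Chars.strip p))

-- ===== PRECONDITION & SPEC =====
def Spec_split_versions (value : Option String) (out : List String) : Prop := out = split_versions_alt value
instance (value : Option String) (out : List String) : Decidable (Spec_split_versions value out) := by unfold Spec_split_versions; infer_instance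

-- ===== CLAIM (what is proved, stated in full; the proofs are below) =====
def Claim_equal_split_versions : Prop := ∀ (value : Option String), Dom_split_versions value → Spec_split_versions value (split_versions value)

-- ===== LEMMAS AND PROOFS =====

-- prepend p to the first piece ([p] if there is none)
def consHead (p : List Char) : List (List Char) → List (List Char)
  | [] => [p]
  | t :: ts => (p ++ t) :: ts

-- single-character split, the shape of PySem.Chars.splitOn for a one-char separator
def split1 (a : Char) : List Char → List (List Char)
  | [] => [[]]
  | c :: cs => if c = a then [] :: split1 a cs else consHead [c] (split1 a cs)

theorem split1_ne_nil (a : Char) (cs : List Char) : split1 a cs ≠ [] := by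
  cases cs with
  | nil => simp [split1]
  | cons c cs =>
      simp only [split1]
      split
      · simp
      · cases h : split1 a cs <;> simp [consHead]

theorem reSplitSeps_ne_nil (cs : List Char) : reSplitSeps cs ≠ [] := by
  cases cs with
  | nil => simp [reSplitSeps]
  | cons c cs =>
      simp only [reSplitSeps]
      split
      · simp
      · cases h : reSplitSeps cs <;> simp

theorem go_eq (a : Char) (cs : List Char) :
    ∀ (fuel : Nat) (cur : List Char) (acc : List (List Char)), cs.length ≤ fuel →
      PySem.Chars.splitOn.go [a] fuel cs cur acc
        = acc.reverse ++ consHead cur.reverse (split1 a cs) := by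
  induction cs with
  | nil =>
      intro fuel cur acc _
      cases fuel <;> simp [PySem.Chars.splitOn.go, split1, consHead]
  | cons c cs ih =>
      intro fuel cur acc hle
      cases fuel with
      | zero => simp at hle
      | succ fuel =>
          simp only [PySem.Chars.splitOn.go]
          by_cases hc : c = a
          · subst hc
            have hpre : List.isPrefixOf [c] (c :: cs) = true := by
              simp [List.isPrefixOf]
            rw [if_pos hpre]
            simp only [List.length_cons, List.length_nil, Nat.zero_add, List.drop_succ_cons, List.drop_zero]
            rw [ih fuel [] (cur.reverse :: acc) (by simpa using Nat.le_of_succ_le_succ hle)]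
            simp only [split1, List.reverse_cons, List.reverse_nil,
              List.append_assoc, List.singleton_append]
            cases h : split1 c cs with
            | nil => exact absurd h (split1_ne_nil _ _)
            | cons t ts => simp [consHead]
          · have hpre : List.isPrefixOf [a] (c :: cs) = false := by
              simp only [List.isPrefixOf, Bool.and_true]
              exact decide_eq_false (fun h => hc h.symm)
            rw [if_neg (by simp [hpre])]
            rw [ih fuel (c :: cur) acc (by simpa using Nat.le_of_succ_le_succ hle)]
            simp only [split1, if_neg hc, List.reverse_cons]
            cases h : split1 a cs with
            | nil => exact absurd h (split1_ne_nil _ _)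
            | cons t ts => simp [consHead]

theorem splitOn_single (a : Char) (cs : List Char) :
    PySem.Chars.splitOn cs [a] = split1 a cs := by
  unfold PySem.Chars.splitOn
  rw [go_eq a cs (cs.length + 1) [] [] (Nat.le_succ _)]
  cases h : split1 a cs with
  | nil => exact absurd h (split1_ne_nil a cs)
  | cons t ts => simp [consHead]

theorem flatMap_split1 (cs : List Char) :
    (split1 ',' cs).flatMap (split1 '|') = reSplitSeps cs := by
  induction cs with
  | nil => simp [split1, reSplitSeps]
  | cons c cs ih =>
      by_cases hc : c = ','
      · subst hc
        simp only [split1, reSplitSeps]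
        simp [split1, ih]
      · obtain ⟨t, ts, hts⟩ : ∃ t ts, split1 ',' cs = t :: ts := by
          cases h : split1 ',' cs with
          | nil => exact absurd h (split1_ne_nil _ _)
          | cons t ts => exact ⟨t, ts, rfl⟩
        by_cases hb : c = '|'
        · subst hb
          simp only [split1, if_neg hc, hts, consHead, reSplitSeps, List.flatMap_cons]
          simp [← ih, hts, split1]
        · simp only [split1, if_neg hc, hts, consHead, reSplitSeps, List.singleton_append]
          obtain ⟨u, us, hus⟩ : ∃ u us, split1 '|' t = u :: us := by
            cases h : split1 '|' t with
            | nil => exact absurd h (split1_ne_nil _ _)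
            | cons u us => exact ⟨u, us, rfl⟩
          rw [show ((c :: t) :: ts).flatMap (split1 '|')
                = consHead [c] ((split1 ',' cs).flatMap (split1 '|')) by
            rw [hts]
            simp only [List.flatMap_cons, split1, if_neg hb, hus, consHead]
            simp]
          rw [ih]
          rw [if_neg (by simp [hb, hc])]
          cases h : reSplitSeps cs with
          | nil => exact absurd h (reSplitSeps_ne_nil cs)
          | cons v vs => simp [consHead]

theorem result_eq (cs : List Char) :
    List.foldl (fun parts item => parts ++ PySem.Chars.splitOn item ['|']) []
        ([] ++ PySem.Chars.splitOn cs [','])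
      = reSplitSeps cs := by
  rw [List.nil_append]
  rw [PySem.List.foldl_append_eq_flatMap]
  rw [List.nil_append, splitOn_single]
  rw [show (split1 ',' cs).flatMap (fun item => PySem.Chars.splitOn item ['|'])
        = (split1 ',' cs).flatMap (split1 '|') from
    List.flatMap_congr (fun x _ => splitOn_single '|' x)]
  exact flatMap_split1 cs

-- ===== VERDICT (by name: the statement is the Claim_ definition above) =====
theorem split_versions_spec : Claim_equal_split_versions := by
  intro value _
  unfold Spec_split_versions split_versions split_versions_alt
  cases value with
  | none => rfl
  | some s =>
      simp only [List.foldl_cons, List.foldl_nil]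
      rw [result_eq]
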